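-- pv_equiv track=rewrite | github.com/diiyark123/BOOLEAN_RETRIVEAL_MODEL | ir_assQ2.py | soundex_boolean_search
-- ===== SOURCE A (Python) =====
-- from typing import List, Dict, Set, Tuple
--
-- def soundex(name: str) -> str:
--     name = name.upper()
--     code = {'A': '', 'E': '', 'I': '', 'O': '', 'U': '', 'H': '', 'W': '', 'Y': '',
--             'B': '1', 'F': '1', 'P': '1', 'V': '1',
--             'C': '2', 'G': '2', 'J': '2', 'K': '2', 'Q': '2', 'S': '2', 'X': '2', 'Z': '2',
--             'D': '3', 'T': '3',
--             'L': '4',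
--             'M': '5', 'N': '5',
--             'R': '6'}
--     result = name[0]
--     prev_code = code.get(name[0], '')
--
--     for char in name[1:]:
--         new_code = code.get(char, '')
--         if new_code and new_code != prev_code:
--             result += new_code
--         prev_code = new_code
--
--     result = result[:4].ljust(4, '0')
--     return result
--
-- def soundex_search_single(name: str, inverted_index: Dict[str, Dict[int, List[int]]]) -> Set[int]:
--     name_code = soundex(name)
--     result_docs = set()
--
--     for word, docs in inverted_index.items():
--         if soundex(word) == name_code:
--             result_docs.update(docs.keys())
--
--     return result_docs
--
-- def soundex_boolean_search(query: str, inverted_index: Dict[str, Dict[int, List[int]]]) -> Set[int]: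
--     query = query.lower()
--     words = query.split()
--
--     # Separate operators and words
--     terms = []
--     operators = []
--     i = 0
--     while i < len(words):
--         if words[i] in {"and", "or", "not"}:
--             operators.append(words[i])
--         else:
--             terms.append(words[i])
--         i += 1
--
--     # Evaluate the first term
--     if terms:
--         result_docs = soundex_search_single(terms[0], inverted_index)
--     else:
--         return set()  # No terms to search
--
--     # Process the rest of the terms and operators
--     for idx, operator in enumerate(operators):
--         next_term_docs = soundex_search_single(terms[idx + 1], inverted_index)
--
--         if operator == "and":
--             result_docs &= next_term_docs  # Intersection of sets for AND
--         elif operator == "or":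
--             result_docs |= next_term_docs  # Union of sets for OR
--         elif operator == "not":
--             result_docs -= next_term_docs  # Difference of sets for NOT
--
--     return result_docs
-- ===== SOURCE B (Python) =====
-- # B: precompute a soundex-code -> docset map once (one pass over the index),
-- # then each query term is a single dict lookup instead of a full index scan.
--
-- _CODE = {'A': '', 'E': '', 'I': '', 'O': '', 'U': '', 'H': '', 'W': '', 'Y': '',
--          'B': '1', 'F': '1', 'P': '1', 'V': '1',
--          'C': '2', 'G': '2', 'J': '2', 'K': '2', 'Q': '2', 'S': '2', 'X': '2', 'Z': '2',
--          'D': '3', 'T': '3',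
--          'L': '4',
--          'M': '5', 'N': '5',
--          'R': '6'}
--
-- def _soundex(name):
--     up = name.upper()
--     codes = [_CODE.get(c, '') for c in up]
--     kept = [c for p, c in zip(codes, codes[1:]) if c and c != p]
--     return (up[0] + ''.join(kept))[:4].ljust(4, '0')
--
-- def soundex_boolean_search(query, inverted_index):
--     words = query.lower().split()
--     terms = [w for w in words if w not in ("and", "or", "not")]
--     if not terms:
--         return set()
--     operators = [w for w in words if w in ("and", "or", "not")]
--     by_code = {}
--     for word, docs in inverted_index.items():
--         by_code.setdefault(_soundex(word), set()).update(docs.keys())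
--     result = set(by_code.get(_soundex(terms[0]), set()))
--     for op, term in zip(operators, terms[1:]):
--         docs = by_code.get(_soundex(term), set())
--         if op == "and":
--             result &= docs
--         elif op == "or":
--             result |= docs
--         else:
--             result -= docs
--     return result
-- ===== Notes on version B (the rewrite author's own statement) =====
-- stated objective: alternative
-- what changed: B builds a soundex-code->docset dictionary in a single pass over the inverted index and resolves each query term by one dict lookup, instead of A's full rescan of the index (recomputing soundex of every index word) per term; B also computes soundex via a zip-with-previous comprehension and pairs operators with terms by zip (the per-term rescan disappears, though the measured times on the generated inputs, which have few query terms, are comparable).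
import Mathlib
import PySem

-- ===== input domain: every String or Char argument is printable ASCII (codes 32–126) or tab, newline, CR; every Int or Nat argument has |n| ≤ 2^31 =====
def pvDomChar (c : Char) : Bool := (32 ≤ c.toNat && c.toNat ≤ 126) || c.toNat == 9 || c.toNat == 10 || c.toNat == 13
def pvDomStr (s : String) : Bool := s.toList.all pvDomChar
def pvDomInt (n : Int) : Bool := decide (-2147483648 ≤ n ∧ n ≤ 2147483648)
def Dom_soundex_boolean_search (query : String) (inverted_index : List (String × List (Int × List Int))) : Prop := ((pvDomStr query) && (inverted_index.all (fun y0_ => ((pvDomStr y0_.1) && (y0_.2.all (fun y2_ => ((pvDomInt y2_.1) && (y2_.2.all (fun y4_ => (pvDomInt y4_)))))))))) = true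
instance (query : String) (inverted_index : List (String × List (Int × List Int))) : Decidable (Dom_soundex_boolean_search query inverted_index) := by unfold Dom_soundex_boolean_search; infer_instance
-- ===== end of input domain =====

-- B precomputes a soundex-code → docset map in one pass over the index and resolves each query
-- term by a dict lookup, where A rescans the whole index (re-running soundex on every word) per term.

-- the letter→digit table both Pythons carry as a dict literal
def pvCode : PySem.Dict Char (List Char) := PySem.Dict.ofList
  [('A', []), ('E', []), ('I', []), ('O', []), ('U', []), ('H', []), ('W', []), ('Y', []),
   ('B', ['1']), ('F', ['1']), ('P', ['1']), ('V', ['1']),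
   ('C', ['2']), ('G', ['2']), ('J', ['2']), ('K', ['2']), ('Q', ['2']), ('S', ['2']), ('X', ['2']), ('Z', ['2']),
   ('D', ['3']), ('T', ['3']),
   ('L', ['4']),
   ('M', ['5']), ('N', ['5']),
   ('R', ['6'])]

-- words[i] in {"and", "or", "not"} (both Pythons test this literal set)
def pvIsOp (w : String) : Bool := w == "and" || w == "or" || w == "not"

-- ===== PORT A =====
def soundexA (name : List Char) : List Char :=
  match PySem.Chars.upper name with
  | [] => []        -- name[0] raises IndexError on ""; such inputs are outside Pre_
  | c0 :: rest =>
    let st := rest.foldl (fun (p : List Char × List Char) ch =>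
      let nc := pvCode.getD ch []
      ((if nc ≠ [] ∧ nc ≠ p.2 then p.1 ++ nc else p.1), nc)) ([c0], pvCode.getD c0 [])
    let r := st.1.take 4                      -- result[:4] (nonnegative slice of a list = take)
    r ++ List.replicate (4 - r.length) '0'    -- .ljust(4, '0'): pad on the right to length 4

def soundex_search_singleA (name : List Char) (inverted_index : List (String × List (Int × List Int))) : PySem.Set Int :=
  let code := soundexA name
  inverted_index.foldl (fun s e =>
    if soundexA e.1.toList = code then PySem.Set.update s (e.2.map (·.1)) else s) PySem.Set.empty

def soundex_boolean_search (query : String) (inverted_index : List (String × List (Int × List Int))) : List Int :=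
  let words := PySem.Str.split₀ (PySem.Str.lower query)
  let ts := words.foldl (fun (p : List String × List String) w =>
      if pvIsOp w then (p.1, p.2 ++ [w]) else (p.1 ++ [w], p.2)) ([], [])
  match ts.1 with
  | [] => []
  | t0 :: _ =>
    ((PySem.List.enumerate ts.2 0).foldl (fun (r : Option (PySem.Set Int)) p =>
      match r with
      | none => none
      | some s =>
        match PySem.List.pyGet? ts.1 (p.1 + 1) with
        | none => none                        -- terms[idx+1] raises IndexError; outside Pre_
        | some t =>
          let nd := soundex_search_singleA t.toList inverted_index
          if p.2 = "and" then some (PySem.Set.inter s nd)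
          else if p.2 = "or" then some (PySem.Set.union s nd)
          else if p.2 = "not" then some (PySem.Set.diff s nd)
          else some s) (some (soundex_search_singleA t0.toList inverted_index))).getD []

-- ===== PORT B =====
def soundexB (name : List Char) : List Char :=
  let up := PySem.Chars.upper name
  match up with
  | [] => []        -- up[0] raises IndexError on ""; such inputs are outside Pre_
  | c0 :: _ =>
    let codes := up.map (fun c => pvCode.getD c [])
    let kept := (codes.zip (codes.drop 1)).filterMap
      (fun pc => if pc.2 ≠ [] ∧ pc.2 ≠ pc.1 then some pc.2 else none)
    let r := (c0 :: kept.flatten).take 4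
    r ++ List.replicate (4 - r.length) '0'

def pvByCode (inverted_index : List (String × List (Int × List Int))) : PySem.Dict (List Char) (PySem.Set Int) :=
  inverted_index.foldl (fun d e =>
    let c := soundexB e.1.toList
    d.insert c (PySem.Set.update (d.getD c PySem.Set.empty) (e.2.map (·.1)))) PySem.Dict.empty

def soundex_boolean_search_alt (query : String) (inverted_index : List (String × List (Int × List Int))) : List Int :=
  let words := PySem.Str.split₀ (PySem.Str.lower query)
  let terms := words.filter (fun w => !(pvIsOp w))
  match terms with
  | [] => []
  | t0 :: rest =>
    let operators := words.filter pvIsOp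
    let byCode := pvByCode inverted_index
    (operators.zip rest).foldl (fun s p =>
      let nd := byCode.getD (soundexB p.2.toList) PySem.Set.empty
      if p.1 = "and" then PySem.Set.inter s nd
      else if p.1 = "or" then PySem.Set.union s nd
      else PySem.Set.diff s nd) (byCode.getD (soundexB t0.toList) PySem.Set.empty)

-- ===== PRECONDITION & SPEC =====
-- Pre_ excludes (a) queries on which A raises IndexError: more boolean operators than terms-1
-- (terms[idx+1] out of range) or, when there is a term, an empty-string index key (soundex("")),
-- and (b) duplicate index keys, which a real Python dict argument cannot carry (the association-list
-- encoding would process both entries while Python's dict keeps only the last).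
def Pre_soundex_boolean_search (query : String) (inverted_index : List (String × List (Int × List Int))) : Prop :=
  let words := PySem.Str.split₀ (PySem.Str.lower query)
  let terms := words.filter (fun w => !(pvIsOp w))
  let operators := words.filter pvIsOp
  (inverted_index.map (·.1)).Nodup ∧
  (terms = [] ∨ (operators.length < terms.length ∧ ∀ e ∈ inverted_index, e.1 ≠ ""))
instance (query : String) (inverted_index : List (String × List (Int × List Int))) : Decidable (Pre_soundex_boolean_search query inverted_index) := by unfold Pre_soundex_boolean_search; infer_instance

def pvWitness_soundex_boolean_search : String × (List (String × List (Int × List Int))) :=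
  ("cat or dog", [("cat", [(1, [])]), ("dog", [(2, [3])])])

def Spec_soundex_boolean_search (query : String) (inverted_index : List (String × List (Int × List Int))) (out : List Int) : Prop := out = soundex_boolean_search_alt query inverted_index
instance (query : String) (inverted_index : List (String × List (Int × List Int))) (out : List Int) : Decidable (Spec_soundex_boolean_search query inverted_index out) := by unfold Spec_soundex_boolean_search; infer_instance

-- ===== CLAIM (what is proved, stated in full; the proofs are below) =====
def Claim_equal_soundex_boolean_search : Prop := ∀ (query : String) (inverted_index : List (String × List (Int × List Int))), Dom_soundex_boolean_search query inverted_index → Pre_soundex_boolean_search query inverted_index → Spec_soundex_boolean_search query inverted_index (soundex_boolean_search query inverted_index)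

-- ===== LEMMAS AND PROOFS =====

-- A's term/operator separation loop is the pair of filters B uses
theorem pv_partition (ws : List String) (a b : List String) :
    ws.foldl (fun (p : List String × List String) w =>
      if pvIsOp w then (p.1, p.2 ++ [w]) else (p.1 ++ [w], p.2)) (a, b)
      = (a ++ ws.filter (fun w => !(pvIsOp w)), b ++ ws.filter pvIsOp) := by
  induction ws generalizing a b with
  | nil => simp
  | cons x xs ih =>
    simp only [List.foldl_cons, List.filter_cons]
    by_cases h : pvIsOp x <;> simp [h, ih]

-- the two soundex codings agree (A's prev-carrying fold vs B's zip-with-previous)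
theorem pv_soundex_fold (l : List Char) (acc prev : List Char) :
    (l.foldl (fun (p : List Char × List Char) ch =>
      let nc := pvCode.getD ch []
      ((if nc ≠ [] ∧ nc ≠ p.2 then p.1 ++ nc else p.1), nc)) (acc, prev)).1
    = acc ++ (((prev :: l.map (fun c => pvCode.getD c [])).zip (l.map (fun c => pvCode.getD c []))).filterMap
        (fun pc => if pc.2 ≠ [] ∧ pc.2 ≠ pc.1 then some pc.2 else none)).flatten := by
  induction l generalizing acc prev with
  | nil => simp
  | cons x xs ih =>
    simp only [List.map_cons, List.zip_cons_cons, List.filterMap_cons, List.foldl_cons]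
    by_cases h : pvCode.getD x [] ≠ [] ∧ pvCode.getD x [] ≠ prev <;>
      simp [h, ih, List.append_assoc]

theorem pv_soundex_eq (name : List Char) : soundexA name = soundexB name := by
  unfold soundexA soundexB
  cases h : PySem.Chars.upper name with
  | nil => rfl
  | cons c0 rest => simp [pv_soundex_fold]

-- the grouped map, looked up at any code, is exactly A's single-term scan
theorem pv_group (inverted_index : List (String × List (Int × List Int)))
    (d : PySem.Dict (List Char) (PySem.Set Int)) (c : List Char) :
    (inverted_index.foldl (fun d e =>
        let cc := soundexB e.1.toList
        d.insert cc (PySem.Set.update (d.getD cc PySem.Set.empty) (e.2.map (·.1)))) d).getD c PySem.Set.empty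
    = inverted_index.foldl (fun s e =>
        if soundexB e.1.toList = c then PySem.Set.update s (e.2.map (·.1)) else s) (d.getD c PySem.Set.empty) := by
  induction inverted_index generalizing d with
  | nil => rfl
  | cons e es ih =>
    simp only [List.foldl_cons]
    rw [ih, PySem.Dict.getD_insert]
    by_cases h : soundexB e.1.toList = c
    · simp [h]
    · simp [h, Ne.symm h]

theorem pv_lookup_eq (n : List Char) (inverted_index : List (String × List (Int × List Int))) :
    (pvByCode inverted_index).getD (soundexB n) PySem.Set.empty
      = soundex_search_singleA n inverted_index := by
  unfold pvByCode soundex_search_singleA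
  rw [pv_group]
  simp only [pv_soundex_eq, PySem.Dict.getD_empty]

-- A's enumerate/index loop equals B's zip loop, one offset at a time
theorem pv_loop (terms : List String) (inverted_index : List (String × List (Int × List Int)))
    (ops : List String) (k : Nat) (s : PySem.Set Int)
    (hop : ∀ o ∈ ops, pvIsOp o) (hk : ops.length + (k + 1) ≤ terms.length) :
    (PySem.List.enumerate ops (k : Int)).foldl (fun (r : Option (PySem.Set Int)) p =>
      match r with
      | none => none
      | some s =>
        match PySem.List.pyGet? terms (p.1 + 1) with
        | none => none
        | some t =>
          let nd := soundex_search_singleA t.toList inverted_index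
          if p.2 = "and" then some (PySem.Set.inter s nd)
          else if p.2 = "or" then some (PySem.Set.union s nd)
          else if p.2 = "not" then some (PySem.Set.diff s nd)
          else some s) (some s)
    = some ((ops.zip (terms.drop (k + 1))).foldl (fun s p =>
        let nd := (pvByCode inverted_index).getD (soundexB p.2.toList) PySem.Set.empty
        if p.1 = "and" then PySem.Set.inter s nd
        else if p.1 = "or" then PySem.Set.union s nd
        else PySem.Set.diff s nd) s) := by
  induction ops generalizing k s with
  | nil => simp
  | cons o os ih =>
    have hlen : k + 1 < terms.length := by simp at hk; omega
    have hdrop : terms.drop (k + 1) = terms[k + 1] :: terms.drop (k + 2) := by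
      rw [List.drop_eq_getElem_cons hlen]
    have hget : PySem.List.pyGet? terms ((k : Int) + 1) = some terms[k + 1] := by
      have : ((k : Int) + 1) = ((k + 1 : Nat) : Int) := by push_cast; ring
      rw [this, PySem.List.pyGet?_natCast, List.getElem?_eq_getElem hlen]
    rw [PySem.List.enumerate_cons, hdrop]
    simp only [List.foldl_cons, List.zip_cons_cons, hget]
    have hko : pvIsOp o := hop o (List.mem_cons_self ..)
    have hinit :
        (if o = "and" then some (PySem.Set.inter s (soundex_search_singleA terms[k + 1].toList inverted_index))
         else if o = "or" then some (PySem.Set.union s (soundex_search_singleA terms[k + 1].toList inverted_index))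
         else if o = "not" then some (PySem.Set.diff s (soundex_search_singleA terms[k + 1].toList inverted_index))
         else some s)
        = some (if o = "and" then PySem.Set.inter s ((pvByCode inverted_index).getD (soundexB terms[k + 1].toList) PySem.Set.empty)
            else if o = "or" then PySem.Set.union s ((pvByCode inverted_index).getD (soundexB terms[k + 1].toList) PySem.Set.empty)
            else PySem.Set.diff s ((pvByCode inverted_index).getD (soundexB terms[k + 1].toList) PySem.Set.empty)) := by
      simp only [pv_lookup_eq]
      by_cases h1 : o = "and"
      · simp [h1]
      · by_cases h2 : o = "or"
        · simp [h2]
        · have h3 : o = "not" := by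
            simp only [pvIsOp, Bool.or_eq_true, beq_iff_eq] at hko
            tauto
          simp [h3]
    rw [hinit]
    have : ((k : Int) + 1) = ((k + 1 : Nat) : Int) := by push_cast; ring
    rw [this]
    exact ih (k + 1) _ (fun o ho => hop o (List.mem_cons_of_mem _ ho)) (by simp at hk ⊢; omega)

-- ===== VERDICT (by name: the statement is the Claim_ definition above) =====
theorem soundex_boolean_search_spec : Claim_equal_soundex_boolean_search := by
  intro query inverted_index _ hpre
  simp only [Spec_soundex_boolean_search, soundex_boolean_search, soundex_boolean_search_alt]
  rw [pv_partition]
  simp only [List.nil_append]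
  obtain ⟨-, hpre⟩ := hpre
  cases hterms : (PySem.Str.split₀ (PySem.Str.lower query)).filter (fun w => !(pvIsOp w)) with
  | nil => rfl
  | cons t0 rest =>
    simp only []
    have hops : ∀ o ∈ (PySem.Str.split₀ (PySem.Str.lower query)).filter pvIsOp, pvIsOp o := by
      intro o ho; exact (List.mem_filter.mp ho).2
    rcases hpre with h | ⟨hlt, -⟩
    · rw [hterms] at h; cases h
    · rw [hterms] at hlt
      have := pv_loop (t0 :: rest) inverted_index
        ((PySem.Str.split₀ (PySem.Str.lower query)).filter pvIsOp) 0
        (soundex_search_singleA t0.toList inverted_index) hops (by simpa using hlt)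
      rw [show ((0 : Nat) : Int) = (0 : Int) by norm_num] at this
      rw [this]
      simp only [Option.getD_some, List.drop_succ_cons, List.drop_zero, pv_lookup_eq]
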